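-- pv_equiv track=rewrite | github.com/KumbyConsulting/HolonicTrader | HolonicTrader/agent_governor.py | _are_correlated
-- ===== SOURCE A (Python) =====
-- def _are_correlated(sym1: str, sym2: str) -> bool:
--     """
--     Check if two symbols are in the same correlation family.
--     """
--     # Define families
--     families = [
--         ['BTC/USDT', 'ETH/USDT'],  # Majors move together
--         ['SOL/USDT', 'ADA/USDT', 'AVAX/USDT', 'DOT/USDT'],  # L1s
--         ['DOGE/USDT', 'SHIB/USDT', 'PEPE/USDT'],  # Memes
--         ['XRP/USDT', 'LTC/USDT'],  # OG Alts
--         ['LINK/USDT', 'UNI/USDT', 'AAVE/USDT'],  # DeFi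
--     ]
--
--     for family in families:
--         if sym1 in family and sym2 in family:
--             return True
--     return False
-- ===== SOURCE B (Python) =====
-- _FAMILIES = [
--     ['BTC/USDT', 'ETH/USDT'],  # Majors move together
--     ['SOL/USDT', 'ADA/USDT', 'AVAX/USDT', 'DOT/USDT'],  # L1s
--     ['DOGE/USDT', 'SHIB/USDT', 'PEPE/USDT'],  # Memes
--     ['XRP/USDT', 'LTC/USDT'],  # OG Alts
--     ['LINK/USDT', 'UNI/USDT', 'AAVE/USDT'],  # DeFi
-- ]
--
-- # symbol -> index of its family, built once
-- _FAMILY_INDEX = {sym: i for i, fam in enumerate(_FAMILIES) for sym in fam}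
--
--
-- def _are_correlated(sym1: str, sym2: str) -> bool:
--     i1 = _FAMILY_INDEX.get(sym1)
--     return i1 is not None and i1 == _FAMILY_INDEX.get(sym2)
-- ===== Notes on version B (the rewrite author's own statement) =====
-- stated objective: idiomatic
-- what changed: Replaces the per-call loop over the family lists (two membership scans per family) with a precomputed symbol-to-family-index dict; the check becomes two lookups and an equality, with absent symbols mapping to None and hence False.
import Mathlib
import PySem

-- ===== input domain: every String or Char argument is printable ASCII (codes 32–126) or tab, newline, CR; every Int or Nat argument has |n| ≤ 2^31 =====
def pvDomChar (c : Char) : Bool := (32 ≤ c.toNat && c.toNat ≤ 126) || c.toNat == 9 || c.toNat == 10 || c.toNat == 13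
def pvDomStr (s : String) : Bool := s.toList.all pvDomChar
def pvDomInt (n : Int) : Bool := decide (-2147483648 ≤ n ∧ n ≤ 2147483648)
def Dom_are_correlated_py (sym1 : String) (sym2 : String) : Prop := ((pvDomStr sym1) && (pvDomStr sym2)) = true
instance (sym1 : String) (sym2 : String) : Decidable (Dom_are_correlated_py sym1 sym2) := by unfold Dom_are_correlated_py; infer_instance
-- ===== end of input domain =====

-- B replaces A's per-call loop over family lists with a precomputed symbol→family-index dict and two lookups (idiomatic; equal on all inputs).

-- ===== PORT A =====
-- the literal `families` list from A
def pvFamilies : List (List String) :=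
  [["BTC/USDT", "ETH/USDT"],
   ["SOL/USDT", "ADA/USDT", "AVAX/USDT", "DOT/USDT"],
   ["DOGE/USDT", "SHIB/USDT", "PEPE/USDT"],
   ["XRP/USDT", "LTC/USDT"],
   ["LINK/USDT", "UNI/USDT", "AAVE/USDT"]]

-- the `for family in families:` loop with early return; `in` on a string list = List.contains (exact)
def pvFamLoop (sym1 : String) (sym2 : String) : List (List String) → Bool
  | [] => false
  | fam :: rest =>
      if fam.contains sym1 && fam.contains sym2 then true else pvFamLoop sym1 sym2 rest

def are_correlated_py (sym1 : String) (sym2 : String) : Bool :=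
  pvFamLoop sym1 sym2 pvFamilies

-- ===== PORT B =====
-- the dict comprehension {sym: i for i, fam in enumerate(_FAMILIES) for sym in fam}
def pvFamilyIndex : PySem.Dict String Int :=
  (PySem.List.enumerate pvFamilies).foldl
    (fun d p => p.2.foldl (fun d sym => d.insert sym p.1) d) PySem.Dict.empty

-- `i1 is not None and i1 == _FAMILY_INDEX.get(sym2)`
def are_correlated_py_alt (sym1 : String) (sym2 : String) : Bool :=
  match PySem.Dict.get? pvFamilyIndex sym1 with
  | none => false
  | some i1 => some i1 == PySem.Dict.get? pvFamilyIndex sym2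

-- ===== PRECONDITION & SPEC =====
def Spec_are_correlated_py (sym1 : String) (sym2 : String) (out : Bool) : Prop := out = are_correlated_py_alt sym1 sym2
instance (sym1 : String) (sym2 : String) (out : Bool) : Decidable (Spec_are_correlated_py sym1 sym2 out) := by unfold Spec_are_correlated_py; infer_instance

-- ===== CLAIM (what is proved, stated in full; the proofs are below) =====
def Claim_equal_are_correlated_py : Prop := ∀ (sym1 : String) (sym2 : String), Dom_are_correlated_py sym1 sym2 → Spec_are_correlated_py sym1 sym2 (are_correlated_py sym1 sym2)

-- ===== LEMMAS AND PROOFS =====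

-- all symbols occurring in any family
def pvAllSyms : List String :=
  ["BTC/USDT", "ETH/USDT", "SOL/USDT", "ADA/USDT", "AVAX/USDT", "DOT/USDT",
   "DOGE/USDT", "SHIB/USDT", "PEPE/USDT", "XRP/USDT", "LTC/USDT",
   "LINK/USDT", "UNI/USDT", "AAVE/USDT"]

-- the dict comprehension, evaluated once to its literal association list
theorem pvFamilyIndex_eq :
    pvFamilyIndex = PySem.Dict.mk
      [("BTC/USDT", 0), ("ETH/USDT", 0),
       ("SOL/USDT", 1), ("ADA/USDT", 1), ("AVAX/USDT", 1), ("DOT/USDT", 1),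
       ("DOGE/USDT", 2), ("SHIB/USDT", 2), ("PEPE/USDT", 2),
       ("XRP/USDT", 3), ("LTC/USDT", 3),
       ("LINK/USDT", 4), ("UNI/USDT", 4), ("AAVE/USDT", 4)] := by
  decide

theorem pvGetNone (sym : String) (h : sym ∉ pvAllSyms) :
    PySem.Dict.get? pvFamilyIndex sym = none := by
  simp only [pvAllSyms, List.mem_cons, List.not_mem_nil, or_false, not_or] at h
  obtain ⟨h1, h2, h3, h4, h5, h6, h7, h8, h9, h10, h11, h12, h13, h14⟩ := h
  rw [pvFamilyIndex_eq]
  simp [PySem.Dict.get?, Ne.symm h1, Ne.symm h2, Ne.symm h3,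
    Ne.symm h4, Ne.symm h5, Ne.symm h6, Ne.symm h7, Ne.symm h8, Ne.symm h9, Ne.symm h10,
    Ne.symm h11, Ne.symm h12, Ne.symm h13, Ne.symm h14]

theorem pvAlt_unknown_right (sym1 sym2 : String) (h : sym2 ∉ pvAllSyms) :
    are_correlated_py_alt sym1 sym2 = false := by
  have hn := pvGetNone sym2 h
  cases hg : PySem.Dict.get? pvFamilyIndex sym1 <;>
    simp [are_correlated_py_alt, hg, hn]

theorem pvAlt_unknown_left (sym1 sym2 : String) (h : sym1 ∉ pvAllSyms) :
    are_correlated_py_alt sym1 sym2 = false := by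
  simp [are_correlated_py_alt, pvGetNone sym1 h]

theorem pvA_unknown_right (sym1 sym2 : String) (h : sym2 ∉ pvAllSyms) :
    are_correlated_py sym1 sym2 = false := by
  simp only [pvAllSyms, List.mem_cons, List.not_mem_nil, or_false, not_or] at h
  obtain ⟨h1, h2, h3, h4, h5, h6, h7, h8, h9, h10, h11, h12, h13, h14⟩ := h
  unfold are_correlated_py pvFamilies
  simp [pvFamLoop, List.contains_eq_mem, h1, h2, h3, h4, h5, h6, h7, h8, h9, h10, h11, h12, h13, h14]

theorem pvA_unknown_left (sym1 sym2 : String) (h : sym1 ∉ pvAllSyms) :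
    are_correlated_py sym1 sym2 = false := by
  simp only [pvAllSyms, List.mem_cons, List.not_mem_nil, or_false, not_or] at h
  obtain ⟨h1, h2, h3, h4, h5, h6, h7, h8, h9, h10, h11, h12, h13, h14⟩ := h
  unfold are_correlated_py pvFamilies
  simp [pvFamLoop, List.contains_eq_mem, h1, h2, h3, h4, h5, h6, h7, h8, h9, h10, h11, h12, h13, h14]

-- ===== VERDICT (by name: the statement is the Claim_ definition above) =====
theorem are_correlated_py_spec : Claim_equal_are_correlated_py := by
  intro sym1 sym2 _
  unfold Spec_are_correlated_py
  by_cases h1 : sym1 ∈ pvAllSyms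
  · by_cases h2 : sym2 ∈ pvAllSyms
    · fin_cases h1 <;> fin_cases h2 <;> decide
    · rw [pvA_unknown_right sym1 sym2 h2, pvAlt_unknown_right sym1 sym2 h2]
  · rw [pvA_unknown_left sym1 sym2 h1, pvAlt_unknown_left sym1 sym2 h1]
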